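-- pv_equiv track=rewrite | github.com/Cyb3rKotl3Ta/Just_Chill_Python | codewars/foundation/ex_45_Count_the_smiley_faces!.py | count_smileys_v3
-- ===== SOURCE A (Python) =====
-- def count_smileys_v3(arr):
--     eyes = [":", ";"]
--     noses = ["", "-", "~"]
--     mouths = [")", "D"]
--     count = 0
--     for eye in eyes:
--         for nose in noses:
--             for mouth in mouths:
--                 face = eye + nose + mouth
--                 count += arr.count(face)
--     return count
-- ===== SOURCE B (Python) =====
-- def count_smileys_v3(arr):
--     count = 0
--     for s in arr:
--         if not isinstance(s, str):
--             continue
--         cs = list(s)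
--         if len(cs) == 2:
--             ok = cs[0] in ":;" and cs[1] in ")D"
--         elif len(cs) == 3:
--             ok = cs[0] in ":;" and cs[1] in "-~" and cs[2] in ")D"
--         else:
--             ok = False
--         if ok:
--             count += 1
--     return count
-- ===== Notes on version B (the rewrite author's own statement) =====
-- stated objective: alternative
-- what changed: Instead of enumerating all 12 smiley faces and scanning the list once per face with arr.count, B makes a single pass over arr validating each element's structure (eye/optional-nose/mouth characters).
import Mathlib
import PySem

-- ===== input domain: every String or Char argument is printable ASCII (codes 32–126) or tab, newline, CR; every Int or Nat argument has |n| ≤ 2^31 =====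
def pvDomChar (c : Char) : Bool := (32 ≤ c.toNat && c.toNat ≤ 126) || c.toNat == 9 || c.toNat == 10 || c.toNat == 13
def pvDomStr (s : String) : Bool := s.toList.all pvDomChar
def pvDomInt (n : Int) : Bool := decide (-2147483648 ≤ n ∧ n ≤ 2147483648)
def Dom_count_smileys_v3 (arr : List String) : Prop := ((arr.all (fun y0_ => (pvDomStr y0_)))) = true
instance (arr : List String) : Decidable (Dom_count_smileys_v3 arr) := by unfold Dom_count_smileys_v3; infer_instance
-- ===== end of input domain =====

-- B replaces A's twelve scans of arr (one list.count per enumerated face) by a single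
-- pass that structurally validates each element; objective: alternative algorithm, same cost.


-- ===== PORT A =====
def count_smileys_v3 (arr : List String) : Int :=
  let eyes := [":", ";"]
  let noses := ["", "-", "~"]
  let mouths := [")", "D"]
  let count : Int := 0
  eyes.foldl (fun count eye =>
    noses.foldl (fun count nose =>
      mouths.foldl (fun count mouth =>
        let face := eye ++ nose ++ mouth
        count + (PySem.List.count arr face : Int)) count) count) count

-- ===== PORT B =====
-- B's per-element structural check: cs = list(s); valid iff length 2/3 with eye/nose/mouth chars
def pvIsSmiley (s : String) : Bool :=
  match s.toList with
  | [a, b]    => (a == ':' || a == ';') && (b == ')' || b == 'D')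
  | [a, b, c] => (a == ':' || a == ';') && (b == '-' || b == '~') && (c == ')' || c == 'D')
  | _         => false

def count_smileys_v3_alt (arr : List String) : Int :=
  arr.foldl (fun count s => if pvIsSmiley s then count + 1 else count) 0

-- ===== PRECONDITION & SPEC =====
def Spec_count_smileys_v3 (arr : List String) (out : Int) : Prop := out = count_smileys_v3_alt arr
instance (arr : List String) (out : Int) : Decidable (Spec_count_smileys_v3 arr out) := by unfold Spec_count_smileys_v3; infer_instance

-- ===== CLAIM (what is proved, stated in full; the proofs are below) =====
def Claim_equal_count_smileys_v3 : Prop := ∀ (arr : List String), Dom_count_smileys_v3 arr → Spec_count_smileys_v3 arr (count_smileys_v3 arr)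

-- ===== LEMMAS AND PROOFS =====

-- the twelve faces A enumerates
def pvFaces : List String := [":)", ":D", ":-)", ":-D", ":~)", ":~D", ";)", ";D", ";-)", ";-D", ";~)", ";~D"]

-- A's nested loops are the sum over the twelve faces of arr.count(face)
theorem pvA_eq_sum (arr : List String) :
    count_smileys_v3 arr = ((pvFaces.map (fun f => (List.count f arr : Int))).sum) := by
  simp [count_smileys_v3, pvFaces, List.foldl, PySem.List.count_eq]
  ring

-- B's membership test agrees with membership in the twelve faces
theorem pvIsSmiley_iff (x : String) : pvIsSmiley x = true ↔ x ∈ pvFaces := by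
  obtain ⟨cs, rfl⟩ : ∃ cs, x = String.ofList cs := ⟨x.toList, (String.toList_inj.mp (by simp)).symm⟩
  match cs with
  | [] => simp [pvIsSmiley, pvFaces, ← String.toList_inj]
  | [a] => simp [pvIsSmiley, pvFaces, ← String.toList_inj]
  | [a, b] =>
      simp only [pvIsSmiley, String.toList_ofList, pvFaces, List.mem_cons,
        List.not_mem_nil, or_false, ← String.toList_inj, String.toList_ofList]
      simp only [Bool.and_eq_true, Bool.or_eq_true, beq_iff_eq]
      constructor
      · rintro ⟨(rfl | rfl), (rfl | rfl)⟩ <;> simp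
      · rintro (h | h | h | h | h | h | h | h | h | h | h | h) <;> simp_all
  | [a, b, c] =>
      simp only [pvIsSmiley, String.toList_ofList, pvFaces, List.mem_cons,
        List.not_mem_nil, or_false, ← String.toList_inj, String.toList_ofList]
      simp only [Bool.and_eq_true, Bool.or_eq_true, beq_iff_eq]
      constructor
      · rintro ⟨⟨(rfl | rfl), (rfl | rfl)⟩, (rfl | rfl)⟩ <;> simp
      · rintro (h | h | h | h | h | h | h | h | h | h | h | h) <;> simp_all
  | a :: b :: c :: d :: t => simp [pvIsSmiley, pvFaces, ← String.toList_inj]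

-- Σ_{f ∈ l} [x = f] = count of x in l
theorem pvSum_indicator (l : List String) (x : String) :
    ((l.map (fun f => (if x == f then (1:Int) else 0))).sum) = (List.count x l : Int) := by
  induction l with
  | nil => simp
  | cons f t ih =>
      rw [List.map_cons, List.sum_cons, ih, List.count_cons]
      by_cases h : x = f
      · subst h; simp; try omega
      · have h' : ¬ f = x := fun hh => h hh.symm
        simp [h, h']

-- swap A's summation order: the face sum equals the one-pass count of smiley elements
theorem pvSum_eq_countP (arr : List String) :
    ((pvFaces.map (fun f => (List.count f arr : Int))).sum) = (arr.countP pvIsSmiley : Int) := by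
  induction arr with
  | nil => simp [pvFaces]
  | cons x t ih =>
      have hsplit : ∀ f : String, (List.count f (x :: t) : Int)
          = (List.count f t : Int) + (if x == f then (1:Int) else 0) := by
        intro f; rw [List.count_cons]; push_cast; ring
      calc ((pvFaces.map (fun f => (List.count f (x :: t) : Int))).sum)
          = ((pvFaces.map (fun f => (List.count f t : Int) + (if x == f then (1:Int) else 0))).sum) := by
            simp only [hsplit]
        _ = ((pvFaces.map (fun f => (List.count f t : Int))).sum)
            + ((pvFaces.map (fun f => (if x == f then (1:Int) else 0))).sum) := by
            rw [← List.sum_map_add]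
        _ = ((t.countP pvIsSmiley : Int)) + (List.count x pvFaces : Int) := by
            rw [ih, pvSum_indicator]
        _ = ((x :: t).countP pvIsSmiley : Int) := by
            rw [List.countP_cons]
            by_cases h : x ∈ pvFaces
            · have h1 : pvIsSmiley x = true := (pvIsSmiley_iff x).mpr h
              have h2 : List.count x pvFaces = 1 :=
                List.count_eq_one_of_mem (by decide) h
              rw [h1, h2]; simp; try omega
            · have h1 : pvIsSmiley x = false := by
                rw [← Bool.not_eq_true]; simp [pvIsSmiley_iff, h]
              have h2 : List.count x pvFaces = 0 := List.count_eq_zero_of_not_mem h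
              rw [h1, h2]; simp; try omega

-- ===== VERDICT (by name: the statement is the Claim_ definition above) =====
theorem count_smileys_v3_spec : Claim_equal_count_smileys_v3 := by
  intro arr _
  unfold Spec_count_smileys_v3 count_smileys_v3_alt
  rw [PySem.List.foldl_if_add_one, pvA_eq_sum, pvSum_eq_countP]
  simp
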